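-- pv_equiv track=rewrite | github.com/coraline-duval/labyrinth | huntandkill2.py | bords
-- ===== SOURCE A (Python) =====
-- def bords (l):
--     borda=[0]*(l+1)
--     bordo=[]
--     for i in range(l+1): #bord gauche
--         bordo.append(i)
--
--     bordo=bordo+[l]*(l+1) #bord du haut
--     for i in range(l+1):
--         borda.append(i)
--
--     borda=borda+[l]*(l+1)   #bord droit
--     for i in range(l+1):
--         bordo.append(l-i)
--
--     bordo=bordo+[0]*(l+1) #bord du bas
--     for i in range(l+1):
--         borda.append(l-i)
--     return borda, bordo
-- ===== SOURCE B (Python) =====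
-- def bords(l):
--     # Single closed-form index function over one range, then bordo as a rotation
--     # of borda by one side (the y-walk is the x-walk shifted by a quarter turn).
--     n = l + 1
--     def coord(i):
--         if i < n:
--             return 0
--         if i < 2 * n:
--             return i - n
--         if i < 3 * n:
--             return l
--         return 4 * n - 1 - i
--     borda = [coord(i) for i in range(4 * n)]
--     bordo = borda[n:] + borda[:n]
--     return borda, bordo
-- ===== Notes on version B (the rewrite author's own statement) =====
-- stated objective: alternative
-- what changed: B replaces A's four separate side-building loops/concatenations on two parallel lists by one closed-form per-index coordinate function mapped over a single range, and obtains the second list as a rotation of the first by one side length.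
import Mathlib
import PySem

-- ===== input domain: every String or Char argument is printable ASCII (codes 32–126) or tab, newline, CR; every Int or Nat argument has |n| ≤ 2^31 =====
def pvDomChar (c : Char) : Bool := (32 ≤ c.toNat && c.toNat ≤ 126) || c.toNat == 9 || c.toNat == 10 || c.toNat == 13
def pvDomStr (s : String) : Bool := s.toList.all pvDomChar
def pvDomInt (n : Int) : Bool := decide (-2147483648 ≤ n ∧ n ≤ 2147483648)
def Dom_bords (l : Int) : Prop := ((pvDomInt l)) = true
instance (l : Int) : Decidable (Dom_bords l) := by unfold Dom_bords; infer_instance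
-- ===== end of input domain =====

-- B computes each x-coordinate by one closed-form index function over a single range and gets the
-- y-list as a rotation of the x-list by one side; A builds two parallel lists in four staged passes.

-- ===== PORT A =====
def bords (l : Int) : List Int × List Int :=
  let borda := PySem.List.pyRepeat [(0 : Int)] (l + 1)
  let bordo : List Int := []
  let bordo := (PySem.List.pyRange 0 (l + 1) 1).foldl (fun acc i => acc ++ [i]) bordo
  let bordo := bordo ++ PySem.List.pyRepeat [l] (l + 1)
  let borda := (PySem.List.pyRange 0 (l + 1) 1).foldl (fun acc i => acc ++ [i]) borda
  let borda := borda ++ PySem.List.pyRepeat [l] (l + 1)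
  let bordo := (PySem.List.pyRange 0 (l + 1) 1).foldl (fun acc i => acc ++ [l - i]) bordo
  let bordo := bordo ++ PySem.List.pyRepeat [(0 : Int)] (l + 1)
  let borda := (PySem.List.pyRange 0 (l + 1) 1).foldl (fun acc i => acc ++ [l - i]) borda
  (borda, bordo)

-- ===== PORT B =====
def pvCoord (l n i : Int) : Int :=
  if i < n then 0
  else if i < 2 * n then i - n
  else if i < 3 * n then l
  else 4 * n - 1 - i

def bords_alt (l : Int) : List Int × List Int :=
  let n := l + 1
  let borda := (PySem.List.pyRange 0 (4 * n) 1).map (pvCoord l n)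
  let bordo := PySem.List.slice borda (some n) none ++ PySem.List.slice borda none (some n)
  (borda, bordo)

-- ===== PRECONDITION & SPEC =====
def Spec_bords (l : Int) (out : List Int × List Int) : Prop := out = bords_alt l
instance (l : Int) (out : List Int × List Int) : Decidable (Spec_bords l out) := by unfold Spec_bords; infer_instance

-- ===== CLAIM (what is proved, stated in full; the proofs are below) =====
def Claim_equal_bords : Prop := ∀ (l : Int), Dom_bords l → Spec_bords l (bords l)

-- ===== LEMMAS AND PROOFS =====

-- the x-walk, written as A builds it
theorem pv_chunks (l : Int) (h : 0 ≤ l) :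
    (PySem.List.pyRange 0 (4 * (l + 1)) 1).map (pvCoord l (l + 1)) =
      List.replicate (l + 1).toNat 0
      ++ (PySem.List.pyRange 0 (l + 1) 1
      ++ (List.replicate (l + 1).toNat l
      ++ (PySem.List.pyRange 0 (l + 1) 1).map (fun i => l - i))) := by
  set n := l + 1 with hn
  have r1 := PySem.List.pyRange_one_append 0 n (4 * n) (by omega) (by omega)
  have r2 := PySem.List.pyRange_one_append n (2 * n) (4 * n) (by omega) (by omega)
  have r3 := PySem.List.pyRange_one_append (2 * n) (3 * n) (4 * n) (by omega) (by omega)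
  have e1 : (PySem.List.pyRange 0 n 1).map (pvCoord l n) = List.replicate n.toNat 0 := by
    refine List.eq_replicate_iff.2 ⟨by simp [PySem.List.length_pyRange_one], ?_⟩
    intro b hb
    obtain ⟨i, hi, rfl⟩ := List.mem_map.1 hb
    have := (PySem.List.mem_pyRange_one).1 hi
    simp [pvCoord]; omega
  have e2 : (PySem.List.pyRange n (2 * n) 1).map (pvCoord l n) = PySem.List.pyRange 0 n 1 := by
    rw [PySem.List.pyRange_one (a := n) (b := 2 * n), PySem.List.pyRange_one (a := 0) (b := n),
      List.map_map, show (2 * n - n).toNat = (n - 0).toNat by omega]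
    apply List.map_congr_left
    intro k hk
    have hk' : (k : Int) < n := by have := List.mem_range.1 hk; omega
    have h1 : 0 ≤ n := by omega
    simp only [Function.comp, pvCoord]
    have c1 : ¬ (n + (k : Int) < n) := by omega
    have c2 : n + (k : Int) < 2 * n := by omega
    simp [c1, c2]
  have e3 : (PySem.List.pyRange (2 * n) (3 * n) 1).map (pvCoord l n) = List.replicate n.toNat l := by
    refine List.eq_replicate_iff.2 ⟨by simp [PySem.List.length_pyRange_one]; omega, ?_⟩
    intro b hb
    obtain ⟨i, hi, rfl⟩ := List.mem_map.1 hb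
    have := (PySem.List.mem_pyRange_one).1 hi
    simp [pvCoord]; omega
  have e4 : (PySem.List.pyRange (3 * n) (4 * n) 1).map (pvCoord l n)
      = (PySem.List.pyRange 0 n 1).map (fun i => l - i) := by
    rw [PySem.List.pyRange_one (a := 3 * n) (b := 4 * n), PySem.List.pyRange_one (a := 0) (b := n),
      List.map_map, List.map_map, show (4 * n - 3 * n).toNat = (n - 0).toNat by omega]
    apply List.map_congr_left
    intro k hk
    have hk' : (k : Int) < n := by have := List.mem_range.1 hk; omega
    simp only [Function.comp, pvCoord]
    have c1 : ¬ (3 * n + (k : Int) < n) := by omega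
    have c2 : ¬ (3 * n + (k : Int) < 2 * n) := by omega
    have c3 : ¬ (3 * n + (k : Int) < 3 * n) := by omega
    simp [c1, c2, c3]; omega
  rw [r1, r2, r3]
  simp only [List.map_append, e1, e2, e3, e4]

-- ===== VERDICT (by name: the statement is the Claim_ definition above) =====
theorem bords_spec : Claim_equal_bords := by
  intro l _
  show _ = _
  by_cases h : 0 ≤ l
  · obtain ⟨m, hm⟩ : ∃ m : Nat, l + 1 = (m : Int) := ⟨(l + 1).toNat, by omega⟩
    have hA := pv_chunks l h
    simp only [bords, bords_alt, hm, Int.toNat_natCast] at hA ⊢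
    rw [hA]
    simp only [PySem.List.foldl_append_singleton_eq_map, PySem.List.pyRepeat_singleton,
      List.nil_append, List.map_id', List.append_assoc, Int.toNat_natCast]
    refine Prod.ext rfl ?_
    rw [PySem.List.slice_from_natCast, PySem.List.slice_to_natCast]
    rw [List.drop_left' (l₁ := List.replicate m (0 : Int)) (by simp),
      List.take_left' (l₁ := List.replicate m (0 : Int)) (by simp)]
    simp [List.append_assoc]
  · -- l < 0: everything is empty
    simp only [bords, bords_alt]
    rw [PySem.List.pyRange_one_eq_nil (show (l + 1 : Int) ≤ 0 by omega),
      PySem.List.pyRange_one_eq_nil (show (4 * (l + 1) : Int) ≤ 0 by omega)]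
    simp [PySem.List.pyRepeat_singleton, show (l + 1).toNat = 0 by omega, PySem.List.slice]
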